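-- pv_equiv track=rewrite | github.com/sp4ghttd/Logisim16bCPU | V2/test_programs/8bmult.py | soft_mult
-- ===== SOURCE A (Python) =====
-- def soft_mult(A, B, depth):
--     res = 0
--     for i in range(depth):
--         b_i = (B>>i)&0x1
--
--         tmp = A if b_i==1 else 0
--         tmp <<= i
--
--         res += tmp;
--
--     return res;
-- ===== SOURCE B (Python) =====
-- def soft_mult(A, B, depth):
--     # Closed form: the loop adds A<<i for each set low bit of B, i.e. A times (B mod 2**depth).
--     if depth <= 0:
--         return 0
--     return A * (B % (2 ** depth))
-- ===== Notes on version B (the rewrite author's own statement) =====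
-- stated objective: faster
-- what changed: Replaces the shift-and-add loop over depth bits by the closed form A * (B mod 2**depth).
import Mathlib
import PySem

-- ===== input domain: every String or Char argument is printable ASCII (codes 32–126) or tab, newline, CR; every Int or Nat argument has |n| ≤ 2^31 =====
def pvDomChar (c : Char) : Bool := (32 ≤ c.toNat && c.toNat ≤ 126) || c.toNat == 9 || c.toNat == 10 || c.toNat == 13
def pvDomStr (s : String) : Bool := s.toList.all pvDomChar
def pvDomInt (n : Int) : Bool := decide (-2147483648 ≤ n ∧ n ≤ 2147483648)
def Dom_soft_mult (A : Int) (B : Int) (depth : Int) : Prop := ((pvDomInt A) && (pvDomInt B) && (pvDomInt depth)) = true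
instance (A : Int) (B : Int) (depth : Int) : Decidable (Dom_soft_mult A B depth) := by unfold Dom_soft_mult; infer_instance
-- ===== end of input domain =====

-- B replaces A's shift-and-add loop over the low `depth` bits of B by the closed form
-- A * (B mod 2^depth) (0 when depth ≤ 0): objective faster (the loop disappears).

-- ===== PORT A =====
-- for i in range(depth): b_i = (B>>i)&1; tmp = (A if b_i==1 else 0) << i; res += tmp.
-- i ∈ range(depth) gives 0 ≤ i, so i.toNat is exact for Python's shift counts here;
-- B>>i is ported as B // 2**i and tmp<<i as tmp * 2**i — both Python-exact for i ≥ 0.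
def soft_mult (A : Int) (B : Int) (depth : Int) : Int :=
  (PySem.List.pyRange 0 depth).foldl
    (fun res i =>
      let b_i := PySem.Int.band (PySem.Int.floordiv B (2 ^ i.toNat)) 1
      let tmp := if b_i = 1 then A else 0
      let tmp := tmp * 2 ^ i.toNat
      res + tmp) 0

-- ===== PORT B =====
-- In the else-branch depth > 0, so depth.toNat is exact for Python's 2 ** depth.
def soft_mult_alt (A : Int) (B : Int) (depth : Int) : Int :=
  if depth ≤ 0 then 0
  else A * PySem.Int.mod B (2 ^ depth.toNat)

-- ===== PRECONDITION & SPEC =====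
def Spec_soft_mult (A : Int) (B : Int) (depth : Int) (out : Int) : Prop := out = soft_mult_alt A B depth
instance (A : Int) (B : Int) (depth : Int) (out : Int) : Decidable (Spec_soft_mult A B depth out) := by unfold Spec_soft_mult; infer_instance

-- ===== CLAIM (what is proved, stated in full; the proofs are below) =====
def Claim_equal_soft_mult : Prop := ∀ (A : Int) (B : Int) (depth : Int), Dom_soft_mult A B depth → Spec_soft_mult A B depth (soft_mult A B depth)

-- ===== LEMMAS AND PROOFS =====

-- Python's x & 1 extracts x mod 2 (two's complement, also for negative x).
theorem pv_band_one (y : Int) : PySem.Int.band y 1 = y % 2 := by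
  unfold PySem.Int.band
  split_ifs with h <;> simp [Nat.and_one_is_mod] <;> omega

-- Python's floor division by a positive divisor is Euclidean division.
theorem pv_floordiv_pos (a b : Int) (hb : 0 < b) : PySem.Int.floordiv a b = a / b := by
  unfold PySem.Int.floordiv
  exact Int.fdiv_eq_ediv_of_nonneg a hb.le

-- Python's mod by a positive divisor is Euclidean mod.
theorem pv_mod_pos (a b : Int) (hb : 0 < b) : PySem.Int.mod a b = a % b := by
  unfold PySem.Int.mod
  exact Int.fmod_eq_emod_of_nonneg a hb.le

-- Peeling the top bit: B mod 2^(n+1) = B mod 2^n + (bit n of B) * 2^n.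
theorem pv_emod_pow_succ (B : Int) (n : Nat) :
    B % (2 ^ (n + 1)) = B % (2 ^ n) + ((B / 2 ^ n) % 2) * 2 ^ n := by
  have h1 : B % 2 ^ n + 2 ^ n * (B / 2 ^ n) = B := Int.emod_add_mul_ediv B (2 ^ n)
  have h2 : B / 2 ^ n % 2 + 2 * (B / 2 ^ n / 2) = B / 2 ^ n := Int.emod_add_mul_ediv (B / 2 ^ n) 2
  have hr : 0 ≤ B % 2 ^ n := Int.emod_nonneg B (by positivity)
  have hr2 : B % 2 ^ n < 2 ^ n := Int.emod_lt_of_pos B (by positivity)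
  have hq : 0 ≤ B / 2 ^ n % 2 := Int.emod_nonneg (B / 2 ^ n) (by norm_num)
  have hq2 : B / 2 ^ n % 2 < 2 := Int.emod_lt_of_pos (B / 2 ^ n) (by norm_num)
  have hpow : (2 : Int) ^ (n + 1) = 2 ^ n * 2 := by ring
  have key : B = (B / 2 ^ n % 2 * 2 ^ n + B % 2 ^ n) + 2 ^ (n + 1) * (B / 2 ^ n / 2) := by
    linear_combination (-1 : Int) * h1 - (2 ^ n : Int) * h2
  conv_lhs => rw [key]
  rw [Int.add_mul_emod_self_left]
  rw [Int.emod_eq_of_lt (by positivity) (by rw [hpow]; nlinarith)]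
  ring

-- The loop over range(n) computes A * (B mod 2^n).
theorem pv_loop_eq (A B : Int) (n : Nat) :
    (PySem.List.pyRange 0 (n : Int)).foldl
      (fun res i =>
        let b_i := PySem.Int.band (PySem.Int.floordiv B (2 ^ i.toNat)) 1
        let tmp := if b_i = 1 then A else 0
        let tmp := tmp * 2 ^ i.toNat
        res + tmp) 0 = A * (B % (2 ^ n)) := by
  induction n with
  | zero => simp
  | succ n ih =>
      have hcast : ((n + 1 : Nat) : Int) = (n : Int) + 1 := by push_cast; ring
      rw [hcast, PySem.List.pyRange_one_succ_right (by positivity), List.foldl_append, ih]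
      simp only [List.foldl_cons, List.foldl_nil, Int.toNat_natCast,
        pv_floordiv_pos B ((2 : Int) ^ n) (by positivity), pv_band_one]
      rw [pv_emod_pow_succ]
      by_cases hb : B / 2 ^ n % 2 = 1
      · rw [if_pos hb, hb]; ring
      · have h0 : B / 2 ^ n % 2 = 0 := by omega
        rw [if_neg hb, h0]; ring

-- ===== VERDICT (by name: the statement is the Claim_ definition above) =====
theorem soft_mult_spec : Claim_equal_soft_mult := by
  intro A B depth _
  unfold Spec_soft_mult soft_mult soft_mult_alt
  by_cases hd : depth ≤ 0
  · have h0 : PySem.List.pyRange 0 depth = [] := by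
      rw [PySem.List.pyRange_one]
      have : (depth - 0).toNat = 0 := by omega
      rw [this]; rfl
    rw [h0, if_pos hd]; rfl
  · have hnn : (depth.toNat : Int) = depth := Int.toNat_of_nonneg (by omega)
    have hloop := pv_loop_eq A B depth.toNat
    rw [hnn] at hloop
    rw [hloop, if_neg hd, pv_mod_pos B ((2 : Int) ^ depth.toNat) (by positivity)]
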